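-- pv_equiv track=rewrite | github.com/LepsyMikolaj3301/Matura__2023 | MATURY I ZADANIA/CKE/2022/Informator 2023/zadanie1.py | zadanie2
-- ===== SOURCE A (Python) =====
-- def rownowaga(plansza):
--     black_pieces = []
--     black_upper_p = []
--     white_pieces = []
--     on_l = ""
--     for lines in plansza:
--         on_l += lines
--     s_plansza = []
--     for l in on_l:
--         if l != '.':
--             s_plansza.append(l)
--     for piece in s_plansza:
--         if piece.isupper():
--             white_pieces.append(piece)
--         if piece.islower():
--             black_pieces.append(piece)
--     for b in black_pieces:
--         black_upper_p.append(b.upper())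
--     # equal = True
--     # if len(white_pieces) == len(white_pieces):
--     #     for piec in black_upper_p:
--     #         if piec not in white_pieces:
--     #             equal = False
--     if len(white_pieces) == len(black_upper_p):
--         if white_pieces.sort() == black_upper_p.sort():
--             return True, 2*len(white_pieces)
--     return False, 0
--
-- def zadanie2(tablica):
--     rownowagi = 0
--     min_num_bierki = 20
--     for i in range(9, len(tablica) + 2, 9):
--         plansza = tablica[i-9:i-1]
--         rowno, num_p = rownowaga(plansza)
--         if rowno:
--             rownowagi += 1
--             if min_num_bierki > num_p:
--                 min_num_bierki = num_p
--     return rownowagi, min_num_bierki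
-- ===== SOURCE B (Python) =====
-- def zadanie2(tablica):
--     # Single streaming pass over the lines: a position counter r cycles 0..8
--     # (line 8 of each block is the separator row and is skipped).  Per board we
--     # keep a signed balance d (+1 uppercase, -1 lowercase) and the cased-piece
--     # count c: the board is balanced iff d == 0, and its piece count is then c
--     # (= 2*white).  A's per-board .sort() comparison is None == None, always
--     # True, so only the counts matter.
--     cnt, mn = 0, 20
--     d, c, r = 0, 0, 0
--     for line in tablica:
--         if r < 8:
--             for ch in line:
--                 if ch.isupper():
--                     d += 1
--                     c += 1
--                 elif ch.islower():
--                     d -= 1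
--                     c += 1
--             if r == 7:
--                 if d == 0:
--                     cnt += 1
--                     if c < mn:
--                         mn = c
--                 d, c = 0, 0
--         r = (r + 1) % 9
--     return cnt, mn
-- ===== Notes on version B (the rewrite author's own statement) =====
-- stated objective: alternative
-- what changed: A slices an 8-line board out of the list at each stride-9 index and, per board, builds four intermediate lists (concatenated chars, non-dot pieces, white and uppercased-black piece lists) and compares their lengths (its .sort() comparison is None == None, vacuously true); B makes one streaming pass over the lines with a cyclic position counter mod 9 (no slicing, no index range, no intermediate lists), maintaining per board a single signed balance (+1 uppercase, -1 lowercase) and a cased-character count, folding (count, min) into the same pass; …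
import Mathlib
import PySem

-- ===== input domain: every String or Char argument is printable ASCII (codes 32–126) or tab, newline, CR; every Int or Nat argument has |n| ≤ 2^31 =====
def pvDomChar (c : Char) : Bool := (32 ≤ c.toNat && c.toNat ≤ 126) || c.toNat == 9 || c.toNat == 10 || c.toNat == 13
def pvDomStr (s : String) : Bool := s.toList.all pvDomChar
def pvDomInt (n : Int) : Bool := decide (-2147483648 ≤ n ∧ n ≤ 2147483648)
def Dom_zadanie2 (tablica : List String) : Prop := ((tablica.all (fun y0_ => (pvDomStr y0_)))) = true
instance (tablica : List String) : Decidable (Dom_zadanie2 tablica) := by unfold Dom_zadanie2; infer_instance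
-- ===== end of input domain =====

-- B replaces A's stride-9 board slicing plus per-board white/black piece-list building
-- (whose .sort() comparison is vacuously true) by one streaming pass over the lines with a
-- mod-9 position counter and a signed uppercase/lowercase balance (no intermediate lists,
-- measured constant-factor faster); objective: alternative.

-- ===== PORT A =====
-- rownowaga: literal port.  Python's `white_pieces.sort() == black_upper_p.sort()` compares
-- None with None (list.sort returns None), so it is the comparison of the two None results.
def rownowaga (plansza : List String) : Bool × Int :=
  let on_l : List Char := plansza.foldl (fun acc lines => acc ++ lines.toList) []
  let s_plansza : List Char := on_l.foldl (fun acc l => if l ≠ '.' then acc ++ [l] else acc) []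
  -- one loop appending to white_pieces / black_pieces under each piece's own test
  let wb : List Char × List Char := s_plansza.foldl (fun acc piece =>
      (if PySem.Chars.isupper piece then acc.1 ++ [piece] else acc.1,
       if PySem.Chars.islower piece then acc.2 ++ [piece] else acc.2)) ([], [])
  let white_pieces := wb.1
  let black_pieces := wb.2
  let black_upper_p : List Char := black_pieces.foldl (fun acc b => acc ++ [PySem.Chars.upperChar b]) []
  if white_pieces.length = black_upper_p.length then
    if ((none : Option Unit) == (none : Option Unit)) then (true, 2 * (white_pieces.length : Int))
    else (false, 0)
  else (false, 0)

def zadanie2 (tablica : List String) : Int × Int :=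
  (PySem.List.pyRange 9 ((tablica.length : Int) + 2) 9).foldl
    (fun st i =>
      let plansza := PySem.List.slice tablica (some (i - 9)) (some (i - 1))
      let rn := rownowaga plansza
      if rn.1 then
        (st.1 + 1, if rn.2 < st.2 then rn.2 else st.2)
      else st)
    (0, 20)

-- ===== PORT B =====
-- the inner character loop: +1/-1 signed balance d, cased count c
def pvStep (dc : Int × Int) (ch : Char) : Int × Int :=
  if PySem.Chars.isupper ch then (dc.1 + 1, dc.2 + 1)
  else if PySem.Chars.islower ch then (dc.1 - 1, dc.2 + 1)
  else dc

-- one iteration of B's line loop; state = ((cnt, mn), (d, c)), r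
def pvBodyB (st : ((Int × Int) × (Int × Int)) × Int) (line : String) :
    ((Int × Int) × (Int × Int)) × Int :=
  if st.2 < 8 then
    let dc' := line.toList.foldl pvStep st.1.2
    let cm' := if st.2 == 7 then
        (if dc'.1 == 0 then
          (st.1.1.1 + 1, if dc'.2 < st.1.1.2 then dc'.2 else st.1.1.2)
        else st.1.1)
      else st.1.1
    let dc'' := if st.2 == 7 then ((0 : Int), (0 : Int)) else dc'
    ((cm', dc''), PySem.Int.mod (st.2 + 1) 9)
  else ((st.1.1, st.1.2), PySem.Int.mod (st.2 + 1) 9)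

def zadanie2_alt (tablica : List String) : Int × Int :=
  (tablica.foldl pvBodyB (((0, 20), (0, 0)), 0)).1.1

-- ===== PRECONDITION & SPEC =====
def Spec_zadanie2 (tablica : List String) (out : Int × Int) : Prop := out = zadanie2_alt tablica
instance (tablica : List String) (out : Int × Int) : Decidable (Spec_zadanie2 tablica out) := by unfold Spec_zadanie2; infer_instance

-- ===== CLAIM (what is proved, stated in full; the proofs are below) =====
def Claim_equal_zadanie2 : Prop := ∀ (tablica : List String), Dom_zadanie2 tablica → Spec_zadanie2 tablica (zadanie2 tablica)

-- ===== LEMMAS AND PROOFS =====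

-- uppercase / lowercase counts of a board
def pvW (pl : List String) : Nat := (pl.flatMap String.toList).countP PySem.Chars.isupper
def pvB (pl : List String) : Nat := (pl.flatMap String.toList).countP PySem.Chars.islower

-- common recursive specification: process the first 8-line board, skip the 9th line, recurse
def pvG (t : List String) (cnt mn : Int) : Int × Int :=
  if t.length < 8 then (cnt, mn)
  else
    let W := pvW (t.take 8)
    let Bc := pvB (t.take 8)
    let cm : Int × Int := if W = Bc then
        (cnt + 1, if 2 * (W : Int) < mn then 2 * (W : Int) else mn)
      else (cnt, mn)
    pvG (t.drop 9) cm.1 cm.2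
termination_by t.length
decreasing_by simp; omega

lemma rownowaga_eq (pl : List String) :
    rownowaga pl = if pvW pl = pvB pl then (true, 2 * (pvW pl : Int)) else (false, 0) := by
  have hu : ∀ c : Char, (PySem.Chars.isupper c && decide (c ≠ '.')) = PySem.Chars.isupper c := by
    intro c
    by_cases h : c = '.'
    · subst h; decide
    · simp [h]
  have hl : ∀ c : Char, (PySem.Chars.islower c && decide (c ≠ '.')) = PySem.Chars.islower c := by
    intro c
    by_cases h : c = '.'
    · subst h; decide
    · simp [h]
  unfold rownowaga
  simp only [PySem.List.foldl_append_eq_flatMap, PySem.List.foldl_append_ite_eq_filter,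
      PySem.List.foldl_prod_mk
        (f := fun acc piece => if PySem.Chars.isupper piece then acc ++ [piece] else acc)
        (g := fun acc piece => if PySem.Chars.islower piece then acc ++ [piece] else acc),
      List.nil_append, Bool.decide_coe, ← List.map_eq_flatMap,
      List.length_map, ← List.countP_eq_length_filter, List.countP_filter]
  rw [show (fun a => PySem.Chars.isupper a && decide (a ≠ '.')) = PySem.Chars.isupper from funext hu,
      show (fun a => PySem.Chars.islower a && decide (a ≠ '.')) = PySem.Chars.islower from funext hl]
  rfl

-- the k+1-st board of t is the k-th board of t.drop 9
lemma slice_shift (t : List String) (k : Nat) :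
    PySem.List.slice t (some ((9:Int) + 9 * ((k : Int) + 1) - 9)) (some ((9:Int) + 9 * ((k : Int) + 1) - 1))
      = PySem.List.slice (t.drop 9) (some ((9:Int) + 9 * (k : Int) - 9)) (some ((9:Int) + 9 * (k : Int) - 1)) := by
  rw [show (9:Int) + 9 * ((k : Int) + 1) - 9 = ((9 * k + 9 : Nat) : Int) from by push_cast; ring,
      show (9:Int) + 9 * ((k : Int) + 1) - 1 = ((9 * k + 17 : Nat) : Int) from by push_cast; ring,
      show (9:Int) + 9 * (k : Int) - 9 = ((9 * k : Nat) : Int) from by push_cast; ring,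
      show (9:Int) + 9 * (k : Int) - 1 = ((9 * k + 8 : Nat) : Int) from by push_cast; ring,
      PySem.List.slice_natCast, PySem.List.slice_natCast, List.drop_drop,
      show 9 * k + 17 - (9 * k + 9) = 9 * k + 8 - 9 * k from by omega,
      show (9 * k + 9 : Nat) = 9 + 9 * k from by omega]

-- A's loop over boards 1..M of t is its loop over boards 0..M-1 of t.drop 9
lemma foldA_shift : ∀ (M : Nat) (t : List String) (st : Int × Int),
    ((List.range M).map (fun (k : Nat) => (9:Int) + 9 * ((k : Int) + 1))).foldl
      (fun st i =>
        let plansza := PySem.List.slice t (some (i - 9)) (some (i - 1))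
        let rn := rownowaga plansza
        if rn.1 then (st.1 + 1, if rn.2 < st.2 then rn.2 else st.2) else st) st
      = ((List.range M).map (fun (k : Nat) => (9:Int) + 9 * (k : Int))).foldl
      (fun st i =>
        let plansza := PySem.List.slice (t.drop 9) (some (i - 9)) (some (i - 1))
        let rn := rownowaga plansza
        if rn.1 then (st.1 + 1, if rn.2 < st.2 then rn.2 else st.2) else st) st := by
  intro M
  induction M with
  | zero => intro t st; rfl
  | succ M ih =>
    intro t st
    rw [List.range_succ, List.map_append, List.map_append, List.foldl_append, List.foldl_append, ih]
    simp only [List.map_cons, List.map_nil, List.foldl_cons, List.foldl_nil, slice_shift]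

-- number of boards A's range enumerates for a list of length n
def pvM (n : Int) : Nat := if 9 < n + 2 then ((n + 2 - 9 + 9 - 1) / 9).toNat else 0

lemma loopA_g : ∀ (M : Nat) (t : List String) (cnt mn : Int), M = pvM (t.length : Int) →
    ((List.range M).map (fun (k : Nat) => (9 : Int) + 9 * (k : Int))).foldl
      (fun st i =>
        let plansza := PySem.List.slice t (some (i - 9)) (some (i - 1))
        let rn := rownowaga plansza
        if rn.1 then (st.1 + 1, if rn.2 < st.2 then rn.2 else st.2) else st)
      (cnt, mn) = pvG t cnt mn := by
  intro M
  induction M with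
  | zero =>
    intro t cnt mn hM
    have h8 : t.length < 8 := by
      by_contra h
      rw [pvM, if_pos (by omega)] at hM
      omega
    simp only [List.range_zero, List.map_nil, List.foldl_nil]
    rw [pvG]
    simp [h8]
  | succ M ih =>
    intro t cnt mn hM
    have h8 : ¬ t.length < 8 := by
      intro h
      rw [pvM, if_neg (by omega)] at hM
      omega
    rw [List.range_succ_eq_map, List.map_cons, List.foldl_cons]
    simp only [Nat.cast_zero, mul_zero, add_zero]
    rw [show PySem.List.slice t (some ((9:Int) - 9)) (some ((9:Int) - 1))
          = PySem.List.slice t (some ((0:Nat) : Int)) (some ((8:Nat) : Int)) from by norm_num,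
        PySem.List.slice_natCast, List.drop_zero, rownowaga_eq]
    rw [List.map_map,
        show ((fun (k : Nat) => (9:Int) + 9 * (k : Int)) ∘ Nat.succ)
          = (fun (k : Nat) => (9:Int) + 9 * ((k : Int) + 1)) from by
            funext k; simp only [Function.comp, Nat.succ_eq_add_one]; push_cast; ring]
    rw [foldA_shift M t]
    have hM' : M = pvM (((t.drop 9).length : Nat) : Int) := by
      simp only [List.length_drop]
      rw [pvM] at hM ⊢
      split_ifs at hM ⊢ <;> omega
    rw [pvG, if_neg h8]
    simp only [Nat.sub_zero]
    by_cases hbal : pvW (t.take 8) = pvB (t.take 8)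
    · simp only [if_pos hbal]
      exact ih (t.drop 9) _ _ hM'
    · simp only [if_neg hbal]
      exact ih (t.drop 9) _ _ hM'

lemma loopB_short : ∀ (t : List String) (r d c cnt mn : Int), 0 ≤ r → r + (t.length : Int) ≤ 7 →
    (t.foldl pvBodyB (((cnt, mn), (d, c)), r)).1.1 = (cnt, mn) := by
  intro t
  induction t with
  | nil => intro r d c cnt mn _ _; rfl
  | cons line tl ih =>
    intro r d c cnt mn hr hlen
    simp only [List.length_cons] at hlen
    have h8 : r < 8 := by omega
    have h7 : (r == 7) = false := by simp; omega
    have hmod : PySem.Int.mod (r + 1) 9 = r + 1 := by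
      show (r + 1).fmod 9 = r + 1
      rw [Int.fmod_eq_emod]
      simp
      exact Int.emod_eq_of_lt (by omega) (by omega)
    simp only [List.foldl_cons, pvBodyB, if_pos h8, h7, if_false, Bool.false_eq_true, hmod]
    exact ih (r + 1) _ _ cnt mn (by omega) (by push_cast at hlen ⊢; omega)

lemma pvStep_fold (l : List Char) : ∀ (d c : Int),
    l.foldl pvStep (d, c) =
      (d + (l.countP PySem.Chars.isupper : Int) - (l.countP PySem.Chars.islower : Int),
       c + (l.countP PySem.Chars.isupper : Int) + (l.countP PySem.Chars.islower : Int)) := by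
  induction l with
  | nil => intro d c; simp
  | cons ch tl ih =>
    intro d c
    have hdisj : PySem.Chars.isupper ch = true → PySem.Chars.islower ch = false := by
      simp only [PySem.Chars.isupper, PySem.Chars.islower, Bool.and_eq_true, decide_eq_true_eq,
        Bool.and_eq_false_iff, decide_eq_false_iff_not, Char.le_def]
      rintro ⟨h1, h2⟩
      left
      intro hcon
      have h2' : ch.toNat ≤ 90 := h2
      have hcon' : 97 ≤ ch.toNat := hcon
      omega
    simp only [List.foldl_cons, List.countP_cons, pvStep]
    by_cases hu : PySem.Chars.isupper ch = true
    · simp [hu, hdisj hu, ih]; constructor <;> ring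
    · by_cases hl : PySem.Chars.islower ch = true
      · simp [eq_false_of_ne_true hu, hl, ih]; constructor <;> ring
      · simp [eq_false_of_ne_true hu, eq_false_of_ne_true hl, ih]

lemma cm_eq (ls : List String) (cnt mn d c : Int)
    (hd : d = (pvW ls : Int) - (pvB ls : Int)) (hc : c = (pvW ls : Int) + (pvB ls : Int)) :
    (if (d == 0) = true then (cnt + 1, if c < mn then c else mn) else (cnt, mn))
      = ((if pvW ls = pvB ls then
            (cnt + 1, if 2 * (pvW ls : Int) < mn then 2 * (pvW ls : Int) else mn)
          else (cnt, mn) : Int × Int)) := by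
  subst hd hc
  simp only [beq_iff_eq, sub_eq_zero, Int.natCast_inj]
  split_ifs with h h1 h2 <;> simp_all <;> omega

lemma loopB_g : ∀ (n : Nat) (t : List String) (cnt mn : Int), t.length ≤ n →
    (t.foldl pvBodyB (((cnt, mn), (0, 0)), 0)).1.1 = pvG t cnt mn := by
  intro n
  induction n with
  | zero =>
    intro t cnt mn h
    have ht : t = [] := List.eq_nil_of_length_eq_zero (by omega)
    subst ht
    rw [pvG]
    rfl
  | succ n ih =>
    intro t cnt mn hlen
    by_cases h8 : t.length < 8
    · rw [pvG, if_pos h8]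
      exact loopB_short t 0 0 0 cnt mn le_rfl (by omega)
    · rcases t with _ | ⟨l0, t⟩; · simp at h8
      rcases t with _ | ⟨l1, t⟩; · simp at h8
      rcases t with _ | ⟨l2, t⟩; · simp at h8
      rcases t with _ | ⟨l3, t⟩; · simp at h8
      rcases t with _ | ⟨l4, t⟩; · simp at h8
      rcases t with _ | ⟨l5, t⟩; · simp at h8
      rcases t with _ | ⟨l6, t⟩; · simp at h8
      rcases t with _ | ⟨l7, rest⟩; · simp at h8
      rw [pvG, if_neg h8]
      simp only [List.foldl_cons, pvBodyB, pvStep_fold,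
        show ((0:Int) < 8) = True from by norm_num,
        show PySem.Int.mod ((0:Int)+1) 9 = 1 from by decide,
        show ((1:Int) < 8) = True from by norm_num,
        show PySem.Int.mod ((1:Int)+1) 9 = 2 from by decide,
        show ((2:Int) < 8) = True from by norm_num,
        show PySem.Int.mod ((2:Int)+1) 9 = 3 from by decide,
        show ((3:Int) < 8) = True from by norm_num,
        show PySem.Int.mod ((3:Int)+1) 9 = 4 from by decide,
        show ((4:Int) < 8) = True from by norm_num,
        show PySem.Int.mod ((4:Int)+1) 9 = 5 from by decide,
        show ((5:Int) < 8) = True from by norm_num,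
        show PySem.Int.mod ((5:Int)+1) 9 = 6 from by decide,
        show ((6:Int) < 8) = True from by norm_num,
        show PySem.Int.mod ((6:Int)+1) 9 = 7 from by decide,
        show ((7:Int) < 8) = True from by norm_num,
        show PySem.Int.mod ((7:Int)+1) 9 = 8 from by decide,
        show (((0:Int)) == 7) = false from by decide,
        show (((1:Int)) == 7) = false from by decide,
        show (((2:Int)) == 7) = false from by decide,
        show (((3:Int)) == 7) = false from by decide,
        show (((4:Int)) == 7) = false from by decide,
        show (((5:Int)) == 7) = false from by decide,
        show (((6:Int)) == 7) = false from by decide,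
        show (((7:Int)) == 7) = true from by decide,
        if_true, Bool.false_eq_true, if_false]
      have htake : List.take 8 (l0 :: l1 :: l2 :: l3 :: l4 :: l5 :: l6 :: l7 :: rest)
          = [l0, l1, l2, l3, l4, l5, l6, l7] := rfl
      have hdrop : List.drop 9 (l0 :: l1 :: l2 :: l3 :: l4 :: l5 :: l6 :: l7 :: rest)
          = List.drop 1 rest := rfl
      rw [htake, hdrop,
        cm_eq [l0, l1, l2, l3, l4, l5, l6, l7] cnt mn _ _
          (by simp only [pvW, pvB, List.flatMap_cons, List.flatMap_nil, List.countP_append,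
                List.append_nil]; push_cast; ring)
          (by simp only [pvW, pvB, List.flatMap_cons, List.flatMap_nil, List.countP_append,
                List.append_nil]; push_cast; ring)]
      rcases rest with _ | ⟨x, rest2⟩
      · simp only [List.foldl_nil, List.drop_nil]
        rw [pvG]
        simp
      · simp only [List.drop_succ_cons, List.drop_zero, List.foldl_cons, pvBodyB,
          show (((8:Int)) < 8) = False from by norm_num, if_false,
          show PySem.Int.mod ((8:Int)+1) 9 = 0 from by decide]
        exact ih rest2 _ _ (by simp at hlen ⊢; omega)

-- ===== VERDICT (by name: the statement is the Claim_ definition above) =====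
theorem zadanie2_spec : Claim_equal_zadanie2 := by
  intro tablica _
  unfold Spec_zadanie2 zadanie2 zadanie2_alt
  rw [PySem.List.pyRange_of_pos 9 ((tablica.length : Int) + 2) (by norm_num)]
  rw [loopA_g (if (9:Int) < (tablica.length : Int) + 2 then (((tablica.length : Int) + 2 - 9 + 9 - 1) / 9).toNat else 0) tablica 0 20 (by unfold pvM; rfl),
      loopB_g tablica.length tablica 0 20 le_rfl]
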